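-- pv_equiv track=rewrite | github.com/oldfashionedjelly/advent-of-code-2023 | Part 1 try 2.py | get_game_ids_sum
-- ===== SOURCE A (Python) =====
-- MAX_CUBES_PER_COLOR = {
--     "red": 12,
--     "green": 13,
--     "blue": 14,
-- }
--
-- CHUNK_END_CHARS = {":", ";", ",", "\n"}
--
-- def get_game_ids_sum(lines: list[str]) -> int:
--     game_ids_sum = 0
--
--     for line in lines:
--         line = line.lower()
--         game_id = 0
--         word_chunk = ""
--         number_chunk = ""
--
--         for char in line:
--             if char in CHUNK_END_CHARS:
--                 if word_chunk == "game":
--                     game_id = int(number_chunk)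
--                 elif word_chunk in MAX_CUBES_PER_COLOR and int(number_chunk) > MAX_CUBES_PER_COLOR[word_chunk]:
--                     game_id = 0
--
--                 word_chunk = ""
--                 number_chunk = ""
--             elif char.isalpha():
--                 word_chunk += char
--             elif char.isdigit():
--                 number_chunk += char
--
--         game_ids_sum += game_id
--     return game_ids_sum
-- ===== SOURCE B (Python) =====
-- MAX_CUBES_PER_COLOR = {
--     "red": 12,
--     "green": 13,
--     "blue": 14,
-- }
--
-- def get_game_ids_sum(lines: list[str]) -> int:
--     total = 0
--     for line in lines:
--         s = line.lower().replace(';', ':').replace(',', ':').replace('\n', ':')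
--         game_id = 0
--         for chunk in s.split(':')[:-1]:
--             word = ''.join(c for c in chunk if c.isalpha())
--             number = ''.join(c for c in chunk if c.isdigit())
--             if word == 'game':
--                 game_id = int(number)
--             elif word in MAX_CUBES_PER_COLOR and int(number) > MAX_CUBES_PER_COLOR[word]:
--                 game_id = 0
--         total += game_id
--     return total
-- ===== Notes on version B (the rewrite author's own statement) =====
-- stated objective: simpler
-- what changed: A runs a char-by-char state machine with word/number accumulators reset at each delimiter; B normalises the delimiters, splits each line into chunks, drops the unterminated last chunk, and evaluates each chunk by filtering its alphabetic and digit characters.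
import Mathlib
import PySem

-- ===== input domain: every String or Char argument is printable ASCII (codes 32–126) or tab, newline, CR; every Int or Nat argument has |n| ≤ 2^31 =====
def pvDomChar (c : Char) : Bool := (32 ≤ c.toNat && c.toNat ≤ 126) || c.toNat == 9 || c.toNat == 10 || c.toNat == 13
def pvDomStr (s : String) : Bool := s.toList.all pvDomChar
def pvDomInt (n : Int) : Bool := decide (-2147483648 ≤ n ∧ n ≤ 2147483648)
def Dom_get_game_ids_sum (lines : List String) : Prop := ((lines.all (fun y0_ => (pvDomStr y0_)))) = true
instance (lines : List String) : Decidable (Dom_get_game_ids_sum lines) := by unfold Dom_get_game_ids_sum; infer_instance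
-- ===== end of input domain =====

-- B replaces A's char-by-char state machine with a split-into-chunks decomposition (normalise
-- delimiters, split, drop the unterminated last chunk, evaluate each chunk); objective: simpler.
-- Pre_ excludes only the inputs on which Python A raises ValueError (Python B raises there too).

-- ===== PORT A =====
-- module constant shared by both Pythons
def MAX_CUBES_PER_COLOR : PySem.Dict (List Char) Int :=
  PySem.Dict.mk [(['r','e','d'], 12), (['g','r','e','e','n'], 13), (['b','l','u','e'], 14)]

def CHUNK_END_CHARS : List Char := [':', ';', ',', '\n']

-- one step of A's inner 'for char in line' loop; state = (game_id, word_chunk, number_chunk).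
-- int(number_chunk) raises ValueError on the empty string; those inputs are excluded by Pre_
-- below, the port carries (… .getD 0) there.
def pvStepA (st : Int × List Char × List Char) (char : Char) : Int × List Char × List Char :=
  if char ∈ CHUNK_END_CHARS then
    (if st.2.1 = ['g','a','m','e'] then (PySem.Int.ofChars? st.2.2).getD 0
     else if MAX_CUBES_PER_COLOR.contains st.2.1 = true ∧
             (PySem.Int.ofChars? st.2.2).getD 0 > MAX_CUBES_PER_COLOR.getD st.2.1 0 then 0
     else st.1, [], [])
  else if PySem.Chars.isalpha char then (st.1, st.2.1 ++ [char], st.2.2)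
  else if PySem.Chars.isdigit char then (st.1, st.2.1, st.2.2 ++ [char])
  else st

def get_game_ids_sum (lines : List String) : Int :=
  lines.foldl
    (fun game_ids_sum line0 =>
      let line := PySem.Chars.lower line0.toList
      let final := line.foldl pvStepA (0, [], [])
      game_ids_sum + final.1) 0

-- ===== PORT B =====
-- evaluate one terminated chunk: word = its alphabetic chars, number = its digit chars
def evalChunkB (game_id : Int) (chunk : List Char) : Int :=
  let word := chunk.filter PySem.Chars.isalpha
  let number := chunk.filter PySem.Chars.isdigit
  if word = ['g','a','m','e'] then (PySem.Int.ofChars? number).getD 0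
  else if MAX_CUBES_PER_COLOR.contains word = true ∧
          (PySem.Int.ofChars? number).getD 0 > MAX_CUBES_PER_COLOR.getD word 0 then 0
  else game_id

def get_game_ids_sum_alt (lines : List String) : Int :=
  lines.foldl
    (fun total line =>
      let s := PySem.Chars.replace (PySem.Chars.replace (PySem.Chars.replace
                 (PySem.Chars.lower line.toList) [';'] [':']) [','] [':']) ['\n'] [':']
      let chunks := PySem.List.slice (PySem.Chars.splitOn s [':']) none (some (-1))
      total + chunks.foldl evalChunkB 0) 0

-- ===== PRECONDITION & SPEC =====
-- the delimiter-separated chunks of a line (the last chunk is the unterminated one)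
def pvSplitD : List Char → List (List Char)
  | [] => [[]]
  | c :: cs => if c ∈ CHUNK_END_CHARS then [] :: pvSplitD cs
               else (pvSplitD cs).modifyHead (fun p => c :: p)

-- Pre_ excludes exactly the inputs on which Python A raises ValueError (int('') on a terminated
-- chunk whose word is 'game' or a colour but which contains no digit); Python B raises there too.
def Pre_get_game_ids_sum (lines : List String) : Prop :=
  ∀ line ∈ lines, ∀ chunk ∈ (pvSplitD (PySem.Chars.lower line.toList)).dropLast,
    (chunk.filter PySem.Chars.isalpha = ['g','a','m','e'] ∨
     chunk.filter PySem.Chars.isalpha ∈ [['r','e','d'], ['g','r','e','e','n'], ['b','l','u','e']]) →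
    chunk.filter PySem.Chars.isdigit ≠ []

instance (lines : List String) : Decidable (Pre_get_game_ids_sum lines) := by
  unfold Pre_get_game_ids_sum; infer_instance

def pvWitness_get_game_ids_sum : List String := ["Game 7: 3 blue, 14 red; 2 green\n"]

def Spec_get_game_ids_sum (lines : List String) (out : Int) : Prop := out = get_game_ids_sum_alt lines
instance (lines : List String) (out : Int) : Decidable (Spec_get_game_ids_sum lines out) := by unfold Spec_get_game_ids_sum; infer_instance

-- ===== CLAIM (what is proved, stated in full; the proofs are below) =====
def Claim_equal_get_game_ids_sum : Prop := ∀ (lines : List String), Dom_get_game_ids_sum lines → Pre_get_game_ids_sum lines → Spec_get_game_ids_sum lines (get_game_ids_sum lines)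

-- ===== LEMMAS AND PROOFS =====

-- an alphabetic char is not a digit
theorem pv_alpha_not_digit (c : Char) (h : PySem.Chars.isalpha c = true) :
    PySem.Chars.isdigit c = false := by
  simp only [PySem.Chars.isalpha, PySem.Chars.isupper, PySem.Chars.islower, PySem.Chars.isdigit,
    Bool.or_eq_true, Bool.and_eq_true, decide_eq_true_eq, Bool.and_eq_false_iff,
    decide_eq_false_iff_not, Char.le_def, UInt32.le_iff_toNat_le,
    show ('A':Char).val.toNat = 65 from rfl, show ('Z':Char).val.toNat = 90 from rfl,
    show ('a':Char).val.toNat = 97 from rfl, show ('z':Char).val.toNat = 122 from rfl,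
    show ('0':Char).val.toNat = 48 from rfl, show ('9':Char).val.toNat = 57 from rfl] at *
  omega

-- single-char str.replace is a map over the characters
theorem pv_replace_go (a b : Char) :
    ∀ (fuel : Nat) (l acc : List Char), l.length ≤ fuel →
      PySem.Chars.replace.go [a] [b] fuel l acc
        = acc.reverse ++ l.map (fun c => if c = a then b else c) := by
  intro fuel
  induction fuel with
  | zero =>
    intro l acc hl
    have : l = [] := List.eq_nil_of_length_eq_zero (Nat.le_zero.mp hl)
    subst this
    simp [PySem.Chars.replace.go]
  | succ f ih =>
    intro l acc hl
    cases l with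
    | nil => simp [PySem.Chars.replace.go]
    | cons c t =>
      have hlen : t.length ≤ f := by simpa using hl
      by_cases hc : c = a
      · subst hc
        have hpre : [c].isPrefixOf (c :: t) = true := by simp [List.isPrefixOf]
        simp only [PySem.Chars.replace.go, hpre, if_pos]
        rw [show List.drop [c].length (c :: t) = t from by simp]
        rw [ih t ([b].reverse ++ acc) hlen]
        simp
      · have hpre : [a].isPrefixOf (c :: t) = false := by
          simp [List.isPrefixOf]; exact fun h => absurd h.symm hc
        simp only [PySem.Chars.replace.go, hpre, Bool.false_eq_true, if_neg, not_false_iff]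
        rw [ih t (c :: acc) hlen]
        simp [hc]

theorem pv_replace_single (a b : Char) (cs : List Char) :
    PySem.Chars.replace cs [a] [b] = cs.map (fun c => if c = a then b else c) := by
  simp [PySem.Chars.replace, pv_replace_go a b cs.length cs [] (le_refl _)]

-- structural single-delimiter split
def pvSplit1 (d : Char) : List Char → List (List Char)
  | [] => [[]]
  | c :: cs => if c = d then [] :: pvSplit1 d cs
               else (pvSplit1 d cs).modifyHead (fun p => c :: p)

theorem pvSplit1_ne_nil (d : Char) (cs : List Char) : pvSplit1 d cs ≠ [] := by
  cases cs with
  | nil => simp [pvSplit1]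
  | cons c t =>
    simp only [pvSplit1]
    split_ifs
    · simp
    · simpa using pvSplit1_ne_nil d t

theorem pvSplitD_ne_nil (cs : List Char) : pvSplitD cs ≠ [] := by
  cases cs with
  | nil => simp [pvSplitD]
  | cons c t =>
    simp only [pvSplitD]
    split_ifs
    · simp
    · simpa using pvSplitD_ne_nil t

theorem pv_splitOn_go (d : Char) :
    ∀ (fuel : Nat) (l cur : List Char) (acc : List (List Char)), l.length < fuel →
      PySem.Chars.splitOn.go [d] fuel l cur acc
        = acc.reverse ++ (pvSplit1 d l).modifyHead (fun p => cur.reverse ++ p) := by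
  intro fuel
  induction fuel with
  | zero => intro l cur acc hl; omega
  | succ f ih =>
    intro l cur acc hl
    cases l with
    | nil => simp [PySem.Chars.splitOn.go, pvSplit1]
    | cons c t =>
      have hlen : t.length < f := by simpa using hl
      by_cases hc : c = d
      · subst hc
        have hpre : [c].isPrefixOf (c :: t) = true := by simp [List.isPrefixOf]
        simp only [PySem.Chars.splitOn.go, hpre, if_pos]
        rw [show List.drop [c].length (c :: t) = t from by simp]
        rw [ih t [] (cur.reverse :: acc) hlen]
        cases hh : pvSplit1 c t with
        | nil => simp [pvSplit1, hh, List.modifyHead]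
        | cons x xs => simp [pvSplit1, hh, List.modifyHead]
      · have hpre : [d].isPrefixOf (c :: t) = false := by
          simp [List.isPrefixOf]; exact fun h => absurd h.symm hc
        simp only [PySem.Chars.splitOn.go, hpre, Bool.false_eq_true, if_neg, not_false_iff]
        rw [ih t (c :: cur) acc hlen]
        obtain ⟨h, rest, hrest⟩ : ∃ h rest, pvSplit1 d t = h :: rest := by
          cases hh : pvSplit1 d t with
          | nil => exact absurd hh (pvSplit1_ne_nil d t)
          | cons x xs => exact ⟨x, xs, rfl⟩
        simp [pvSplit1, hc, hrest]

theorem pv_splitOn_single (d : Char) (cs : List Char) :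
    PySem.Chars.splitOn cs [d] = pvSplit1 d cs := by
  rw [PySem.Chars.splitOn, pv_splitOn_go d (cs.length + 1) cs [] [] (by omega)]
  obtain ⟨h, rest, hrest⟩ : ∃ h rest, pvSplit1 d cs = h :: rest := by
    cases hh : pvSplit1 d cs with
    | nil => exact absurd hh (pvSplit1_ne_nil d cs)
    | cons x xs => exact ⟨x, xs, rfl⟩
  simp [hrest]

-- B's three replaces normalise every delimiter to ':'
def pvNormChar (c : Char) : Char := if c ∈ CHUNK_END_CHARS then ':' else c

theorem pv_norm_comp (c : Char) :
    (if (if (if c = ';' then ':' else c) = ',' then ':' else (if c = ';' then ':' else c)) = '\n'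
     then ':' else (if (if c = ';' then ':' else c) = ',' then ':' else (if c = ';' then ':' else c)))
      = pvNormChar c := by
  by_cases h1 : c = ';' <;> by_cases h2 : c = ',' <;> by_cases h3 : c = '\n' <;>
    simp_all [pvNormChar, CHUNK_END_CHARS]

theorem pv_norm_eq_map (cs : List Char) :
    PySem.Chars.replace (PySem.Chars.replace (PySem.Chars.replace cs [';'] [':']) [','] [':']) ['\n'] [':']
      = cs.map pvNormChar := by
  rw [pv_replace_single, pv_replace_single, pv_replace_single, List.map_map, List.map_map]
  apply List.map_congr_left
  intro c _
  simpa [Function.comp] using pv_norm_comp c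

theorem pvSplit1_map_norm (cs : List Char) :
    pvSplit1 ':' (cs.map pvNormChar) = pvSplitD cs := by
  induction cs with
  | nil => simp [pvSplit1, pvSplitD]
  | cons c t ih =>
    by_cases hc : c ∈ CHUNK_END_CHARS
    · have : pvNormChar c = ':' := by simp [pvNormChar, hc]
      simp [pvSplit1, pvSplitD, this, hc, ih]
    · have h1 : pvNormChar c = c := by simp [pvNormChar, hc]
      have h2 : c ≠ ':' := by intro h; exact hc (by simp [CHUNK_END_CHARS, h])
      simp [pvSplit1, pvSplitD, h1, h2, hc, ih]

-- the chunk-evaluation core, with A's pending word/number accumulators merged into the first chunk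
def pvEval (gid : Int) (w n : List Char) : Int :=
  if w = ['g','a','m','e'] then (PySem.Int.ofChars? n).getD 0
  else if MAX_CUBES_PER_COLOR.contains w = true ∧
          (PySem.Int.ofChars? n).getD 0 > MAX_CUBES_PER_COLOR.getD w 0 then 0
  else gid

theorem pv_evalChunkB_eq (g : Int) (ch : List Char) :
    evalChunkB g ch = pvEval g (ch.filter PySem.Chars.isalpha) (ch.filter PySem.Chars.isdigit) := by
  simp [evalChunkB, pvEval]

def pvChunkFold (gid : Int) (w n : List Char) : List (List Char) → Int
  | [] => gid
  | c0 :: rest =>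
      rest.foldl evalChunkB
        (pvEval gid (w ++ c0.filter PySem.Chars.isalpha) (n ++ c0.filter PySem.Chars.isdigit))

theorem pvChunkFold_nil_pending (g : Int) (l : List (List Char)) :
    pvChunkFold g [] [] l = l.foldl evalChunkB g := by
  cases l with
  | nil => simp [pvChunkFold]
  | cons c0 rest => simp [pvChunkFold, List.foldl_cons, pv_evalChunkB_eq]

theorem pvCF_delim (g : Int) (w n : List Char) (l : List (List Char)) :
    pvChunkFold g w n ([] :: l) = pvChunkFold (pvEval g w n) [] [] l := by
  cases l <;> simp [pvChunkFold, pv_evalChunkB_eq]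

theorem pvCF_alpha {c : Char} (ha : PySem.Chars.isalpha c = true)
    (g : Int) (w n h : List Char) (l : List (List Char)) :
    pvChunkFold g w n ((c :: h) :: l) = pvChunkFold g (w ++ [c]) n (h :: l) := by
  simp only [pvChunkFold, List.filter_cons, ha, pv_alpha_not_digit c ha, Bool.false_eq_true,
    if_true, if_false]
  rw [show w ++ c :: List.filter PySem.Chars.isalpha h
        = (w ++ [c]) ++ List.filter PySem.Chars.isalpha h from by simp]

theorem pvCF_digit {c : Char} (ha : PySem.Chars.isalpha c = false)
    (hg : PySem.Chars.isdigit c = true)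
    (g : Int) (w n h : List Char) (l : List (List Char)) :
    pvChunkFold g w n ((c :: h) :: l) = pvChunkFold g w (n ++ [c]) (h :: l) := by
  simp only [pvChunkFold, List.filter_cons, ha, hg, Bool.false_eq_true, if_true, if_false]
  rw [show n ++ c :: List.filter PySem.Chars.isdigit h
        = (n ++ [c]) ++ List.filter PySem.Chars.isdigit h from by simp]

theorem pvCF_other {c : Char} (ha : PySem.Chars.isalpha c = false)
    (hg : PySem.Chars.isdigit c = false)
    (g : Int) (w n h : List Char) (l : List (List Char)) :
    pvChunkFold g w n ((c :: h) :: l) = pvChunkFold g w n (h :: l) := by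
  simp [pvChunkFold, ha, hg]

-- A's inner character loop computes the chunkwise fold
theorem pv_foldA_chunks :
    ∀ (cs : List Char) (g : Int) (w n : List Char),
      (cs.foldl pvStepA (g, w, n)).1 = pvChunkFold g w n ((pvSplitD cs).dropLast) := by
  intro cs
  induction cs with
  | nil => intro g w n; simp [pvSplitD, pvChunkFold]
  | cons c t ih =>
    intro g w n
    obtain ⟨h, rest, hrest⟩ : ∃ h rest, pvSplitD t = h :: rest := by
      cases hh : pvSplitD t with
      | nil => exact absurd hh (pvSplitD_ne_nil t)
      | cons x xs => exact ⟨x, xs, rfl⟩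
    by_cases hd : c ∈ CHUNK_END_CHARS
    · have hstep : pvStepA (g, w, n) c = (pvEval g w n, [], []) := by
        simp [pvStepA, hd, pvEval]
      rw [List.foldl_cons, hstep, ih, hrest,
        show pvSplitD (c :: t) = [] :: h :: rest from by simp [pvSplitD, hd, hrest],
        List.dropLast_cons₂, pvCF_delim]
    · have hsplit : pvSplitD (c :: t) = (c :: h) :: rest := by
        simp [pvSplitD, hd, hrest, List.modifyHead]
      have step : ∀ w' n', pvStepA (g, w, n) c = (g, w', n') →
          (∀ l, pvChunkFold g w n ((c :: h) :: l) = pvChunkFold g w' n' (h :: l)) →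
          (List.foldl pvStepA (g, w, n) (c :: t)).1 = pvChunkFold g w n ((pvSplitD (c :: t)).dropLast) := by
        intro w' n' hstep hcf
        rw [List.foldl_cons, hstep, ih, hrest, hsplit]
        cases rest with
        | nil => simp [pvChunkFold]
        | cons r0 r1 =>
          rw [List.dropLast_cons₂, List.dropLast_cons₂, hcf]
      by_cases ha : PySem.Chars.isalpha c
      · exact step (w ++ [c]) n (by simp [pvStepA, hd, ha]) (fun l => pvCF_alpha ha g w n h l)
      · by_cases hg : PySem.Chars.isdigit c
        · exact step w (n ++ [c]) (by simp [pvStepA, hd, ha, hg]) (fun l => pvCF_digit (by simp [ha]) hg g w n h l)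
        · exact step w n (by simp [pvStepA, hd, ha, hg]) (fun l => pvCF_other (by simp [ha]) (by simp [hg]) g w n h l)

-- A's and B's per-line computations both equal the same chunk fold
theorem pv_line_eq (line : String) :
    ((PySem.Chars.lower line.toList).foldl pvStepA (0, [], [])).1
      = (PySem.List.slice
          (PySem.Chars.splitOn
            (PySem.Chars.replace (PySem.Chars.replace (PySem.Chars.replace
              (PySem.Chars.lower line.toList) [';'] [':']) [','] [':']) ['\n'] [':'])
            [':'])
          none (some (-1))).foldl evalChunkB 0 := by
  rw [pv_norm_eq_map, pv_splitOn_single, pvSplit1_map_norm, PySem.List.slice_to_neg_one,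
    pv_foldA_chunks, pvChunkFold_nil_pending]

-- ===== VERDICT (by name: the statement is the Claim_ definition above) =====
theorem get_game_ids_sum_spec : Claim_equal_get_game_ids_sum := by
  intro lines _ _
  unfold Spec_get_game_ids_sum get_game_ids_sum get_game_ids_sum_alt
  apply PySem.List.foldl_congr_mem
  intro acc line _
  simp only []
  rw [pv_line_eq line]
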